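-- pv_equiv track=rewrite | github.com/DanielTarsalainen/Postinumerot | postinumerot.py | groupby_district
-- ===== SOURCE A (Python) =====
-- def groupby_district(number_library):
--     places = {}
--
--     for postalnumber, name in number_library.items():
--         name = cleanup_district(name)
--
--         if name not in places:
--             places[name] = []
--
--         places[name].append(postalnumber)
--
--     return places
--
-- def cleanup_district(district):
--     cleaned_district = district.replace(" ", "").replace("-", "")
--
--     if cleaned_district == "SMARTPSOT":
--         cleaned_district = cleaned_district.replace("SO", "OS")
--
--     return cleaned_district
-- ===== SOURCE B (Python) =====
-- def cleanup_district(district):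
--     cleaned_district = district.replace(" ", "").replace("-", "")
--
--     if cleaned_district == "SMARTPSOT":
--         cleaned_district = cleaned_district.replace("SO", "OS")
--
--     return cleaned_district
--
--
-- def groupby_district(number_library):
--     # two-pass grouping: list the (cleaned name, postal number) pairs once,
--     # then build each group by a scan over that list, keyed in first-appearance order
--     pairs = [(cleanup_district(name), pn) for pn, name in number_library.items()]
--     keys = list(dict.fromkeys(k for k, _ in pairs))
--     return {k: [pn for key, pn in pairs if key == k] for k in keys}
-- ===== Notes on version B (the rewrite author's own statement) =====
-- stated objective: alternative
-- what changed: Replaces A's single-pass dict-grouping (insert-empty-then-append per item) by a two-pass decomposition: build the (cleaned key, number) pair list, dedup keys in first-appearance order, then form each group by a scan over the pair list.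
import Mathlib
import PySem

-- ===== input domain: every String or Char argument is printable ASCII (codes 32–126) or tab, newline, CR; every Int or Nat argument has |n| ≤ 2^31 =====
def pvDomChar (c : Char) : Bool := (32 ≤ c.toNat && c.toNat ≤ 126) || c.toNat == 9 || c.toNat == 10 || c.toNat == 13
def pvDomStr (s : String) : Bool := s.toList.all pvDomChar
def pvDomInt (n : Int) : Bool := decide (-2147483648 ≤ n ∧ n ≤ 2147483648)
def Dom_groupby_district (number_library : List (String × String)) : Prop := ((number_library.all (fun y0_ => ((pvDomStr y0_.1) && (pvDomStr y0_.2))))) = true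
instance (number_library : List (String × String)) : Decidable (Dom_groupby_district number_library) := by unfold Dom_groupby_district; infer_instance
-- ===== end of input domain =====

-- B replaces A's single-pass hash-grouping by a two-pass grouping (dedup the cleaned
-- keys in first-appearance order, then build each group by a scan over the pair list);
-- objective: alternative decomposition, same results.

-- ===== PORT A =====
def cleanup_district (district : String) : String :=
  let cleaned_district := PySem.Str.replace (PySem.Str.replace district " " "") "-" ""
  let cleaned_district :=
    if cleaned_district = "SMARTPSOT" then PySem.Str.replace cleaned_district "SO" "OS"
    else cleaned_district
  cleaned_district

def groupby_district (number_library : List (String × String)) : List (String × List String) :=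
  let places : PySem.Dict String (List String) :=
    number_library.foldl (fun places p =>
      let name := cleanup_district p.2
      let places := if places.contains name then places else places.insert name []
      places.modify name [] (fun l => l ++ [p.1])) PySem.Dict.empty
  places.items

-- ===== PORT B =====
def groupby_district_alt (number_library : List (String × String)) : List (String × List String) :=
  let pairs := number_library.map (fun p => (cleanup_district p.2, p.1))
  let keys := PySem.List.dedup (pairs.map (·.1))
  keys.map (fun k => (k, (pairs.filter (fun q => q.1 == k)).map (·.2)))

-- ===== PRECONDITION & SPEC =====
def Spec_groupby_district (number_library : List (String × String)) (out : List (String × List String)) : Prop := out = groupby_district_alt number_library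
instance (number_library : List (String × String)) (out : List (String × List String)) : Decidable (Spec_groupby_district number_library out) := by unfold Spec_groupby_district; infer_instance

-- ===== CLAIM (what is proved, stated in full; the proofs are below) =====
def Claim_equal_groupby_district : Prop := ∀ (number_library : List (String × String)), Dom_groupby_district number_library → Spec_groupby_district number_library (groupby_district number_library)

-- ===== LEMMAS AND PROOFS =====

-- A's "insert [] if absent, then append" step is the same dict as a single modify-append.
lemma step_eq (d : PySem.Dict String (List String)) (k : String) (x : String) :
    (if d.contains k then d else d.insert k []).modify k [] (fun l => l ++ [x])
      = d.modify k [] (fun l => l ++ [x]) := by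
  by_cases h : d.contains k = true
  · simp [h]
  · have h' : d.contains k = false := by simpa using h
    simp [h', PySem.Dict.modify, PySem.Dict.getD_insert_self,
      PySem.Dict.insert_insert_self]
    rw [PySem.Dict.getD_of_not_contains d _ h']
    simp

-- A's loop is the canonical modify-append grouping fold over the (key, value) pairs.
lemma fold_eq (number_library : List (String × String)) :
    (number_library.foldl (fun places p =>
        let name := cleanup_district p.2
        let places := if places.contains name then places else places.insert name []
        places.modify name [] (fun l => l ++ [p.1])) PySem.Dict.empty)
    = (number_library.map (fun p => (cleanup_district p.2, p.1))).foldl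
        (fun d q => d.modify q.1 [] (fun l => l ++ [q.2])) PySem.Dict.empty := by
  rw [List.foldl_map]
  simp only [step_eq]

-- ===== VERDICT (by name: the statement is the Claim_ definition above) =====
theorem groupby_district_spec : Claim_equal_groupby_district := by
  intro nl _
  show groupby_district nl = groupby_district_alt nl
  unfold groupby_district groupby_district_alt
  rw [fold_eq]
  set pairs := nl.map (fun p => (cleanup_district p.2, p.1)) with hpairs
  have hnd : ((pairs.foldl (fun d q => d.modify q.1 [] (fun l => l ++ [q.2])) PySem.Dict.empty)).keys.Nodup := by
    exact PySem.Dict.nodup_keys_foldl_modify_key pairs (·.1) [] (fun d q => fun l => l ++ [q.2]) PySem.Dict.empty (by simp)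
  rw [PySem.Dict.items_eq_map_keys _ hnd []]
  have hkeys : ((pairs.foldl (fun d q => d.modify q.1 [] (fun l => l ++ [q.2])) PySem.Dict.empty)).keys
      = PySem.List.dedup (pairs.map (·.1)) := by
    rw [PySem.Dict.keys_foldl_modify_key pairs (·.1) [] (fun d q => fun l => l ++ [q.2]) PySem.Dict.empty]
    simp [PySem.List.dedup_eq_ofList]
    rfl
  rw [hkeys]
  refine List.map_congr_left ?_
  intro k _
  rw [PySem.Dict.getD_foldl_modify_append pairs PySem.Dict.empty k]
  simp
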